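-- pv_equiv track=rewrite | github.com/retardd/mispi_2 | lab12.py | search
-- ===== SOURCE A (Python) =====
-- def search(a, g):
--     result = [0]*(len(a) + len(g) - 1)
--     for i in range(len(a)):
--         for j in range(len(g)):
--             result[i + j] += a[i] * g[j]
--     for i in range(len(result)):
--         if result[i] % 2 == 0:
--             result[i] = 0
--         else:
--             result[i] = 1
--     return result
-- ===== SOURCE B (Python) =====
-- def search(a, g):
--     # Pack parity bits of a into one big integer and do a carry-less (GF(2))
--     # multiply with shifts/XOR, one word-op per odd coefficient of g.
--     bits = 0
--     for i in range(len(a)):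
--         bits |= (a[i] & 1) << i
--     prod = 0
--     for j in range(len(g)):
--         if g[j] & 1:
--             prod ^= bits << j
--     return [(prod >> k) & 1 for k in range(len(a) + len(g) - 1)]
-- ===== Notes on version B (the rewrite author's own statement) =====
-- stated objective: faster
-- what changed: Replaces the O(n*m) scatter of integer products followed by a mod-2 pass with a GF(2) carry-less multiplication: parities of a are packed into one big integer and each odd coefficient of g contributes a single shift-XOR, so the whole convolution is done by bit-parallel word operations.
import Mathlib
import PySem

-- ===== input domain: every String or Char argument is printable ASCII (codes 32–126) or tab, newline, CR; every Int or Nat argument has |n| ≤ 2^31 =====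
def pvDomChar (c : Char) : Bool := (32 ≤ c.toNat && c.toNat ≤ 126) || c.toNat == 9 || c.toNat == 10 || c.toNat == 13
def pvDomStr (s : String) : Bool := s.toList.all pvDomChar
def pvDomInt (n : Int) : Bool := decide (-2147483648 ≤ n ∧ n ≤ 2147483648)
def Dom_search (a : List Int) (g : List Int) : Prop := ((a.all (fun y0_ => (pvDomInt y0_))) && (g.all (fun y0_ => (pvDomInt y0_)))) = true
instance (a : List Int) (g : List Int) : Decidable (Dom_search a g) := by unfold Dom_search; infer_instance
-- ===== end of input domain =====

-- B replaces A's quadratic scatter of integer products (then a mod-2 pass) with a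
-- bit-parallel GF(2) carry-less multiplication on parity bits (objective: faster).

-- ===== PORT A =====
-- literal port: result = [0]*(len(a)+len(g)-1); double loop scattering a[i]*g[j]
-- into result[i+j]; then an index loop replacing each entry by 0/1 by parity.
def search (a : List Int) (g : List Int) : List Int :=
  let result := List.replicate (a.length + g.length - 1) (0 : Int)
  let result := (List.range a.length).foldl (fun r i =>
      (List.range g.length).foldl (fun r j =>
        r.set (i + j) (r.getD (i + j) 0 + a.getD i 0 * g.getD j 0)) r) result
  (List.range result.length).foldl (fun r i =>
      r.set i (if r.getD i 0 % 2 = 0 then 0 else 1)) result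

-- ===== PORT B =====
-- literal port of Source B: pack parities of a into one natural number, XOR shifted
-- copies for odd coefficients of g, then read the bits of the product back out.
def search_alt (a : List Int) (g : List Int) : List Int :=
  let bits := (List.range a.length).foldl (fun acc i => acc ||| ((a.getD i 0 % 2).toNat <<< i)) 0
  let prod := (List.range g.length).foldl (fun acc j =>
      if g.getD j 0 % 2 = 1 then acc ^^^ (bits <<< j) else acc) 0
  (List.range (a.length + g.length - 1)).map (fun k => (((prod >>> k) &&& 1 : Nat) : Int))

-- ===== PRECONDITION & SPEC =====
def Spec_search (a : List Int) (g : List Int) (out : List Int) : Prop := out = search_alt a g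
instance (a : List Int) (g : List Int) (out : List Int) : Decidable (Spec_search a g out) := by unfold Spec_search; infer_instance

-- ===== CLAIM (what is proved, stated in full; the proofs are below) =====
def Claim_equal_search : Prop := ∀ (a : List Int) (g : List Int), Dom_search a g → Spec_search a g (search a g)

-- ===== LEMMAS AND PROOFS =====

-- the exact integer convolution coefficient at position k
def convC (a g : List Int) (k : Nat) : Int :=
  ∑ i ∈ Finset.range a.length, ∑ j ∈ Finset.range g.length,
    if i + j = k then a.getD i 0 * g.getD j 0 else 0

-- getD after an in-range set
theorem getD_set_lt (r : List Int) (p k : Nat) (v : Int) (hp : p < r.length) :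
    (r.set p v).getD k 0 = if k = p then v else r.getD k 0 := by
  rw [List.getD_eq_getElem?_getD, List.getD_eq_getElem?_getD, List.getElem?_set]
  by_cases h : k = p
  · subst h; simp [hp]
  · rw [if_neg (fun hh => h hh.symm), if_neg h]

-- ===== A-side characterisation =====

theorem innerA (a g : List Int) (i : Nat) (hi : i < a.length) :
    ∀ (m : Nat), m ≤ g.length → ∀ (r : List Int), r.length = a.length + g.length - 1 →
    ((List.range m).foldl (fun r j => r.set (i + j) (r.getD (i + j) 0 + a.getD i 0 * g.getD j 0)) r).length
        = a.length + g.length - 1 ∧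
    ∀ k, ((List.range m).foldl (fun r j => r.set (i + j) (r.getD (i + j) 0 + a.getD i 0 * g.getD j 0)) r).getD k 0
        = r.getD k 0 + ∑ j ∈ Finset.range m, (if i + j = k then a.getD i 0 * g.getD j 0 else 0) := by
  intro m
  induction m with
  | zero => intro _ r hr; simp [hr]
  | succ m ih =>
    intro hm r hr
    obtain ⟨hlen, hval⟩ := ih (by omega) r hr
    rw [List.range_succ, List.foldl_append]
    set R := (List.range m).foldl
        (fun r j => r.set (i + j) (r.getD (i + j) 0 + a.getD i 0 * g.getD j 0)) r with hR
    have hpos : i + m < R.length := by rw [hlen]; omega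
    constructor
    · simp [List.length_set, hlen]
    · intro k
      simp only [List.foldl_cons, List.foldl_nil]
      rw [getD_set_lt R (i + m) k _ hpos, Finset.sum_range_succ]
      by_cases hk : k = i + m
      · subst hk; rw [if_pos rfl, if_pos rfl, hval]; exact add_assoc _ _ _
      · rw [if_neg hk, if_neg (by omega), add_zero, hval]

theorem outerA (a g : List Int) :
    ∀ (m : Nat), m ≤ a.length →
    ((List.range m).foldl (fun r i =>
        (List.range g.length).foldl (fun r j =>
          r.set (i + j) (r.getD (i + j) 0 + a.getD i 0 * g.getD j 0)) r)
      (List.replicate (a.length + g.length - 1) (0 : Int))).length = a.length + g.length - 1 ∧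
    ∀ k, ((List.range m).foldl (fun r i =>
        (List.range g.length).foldl (fun r j =>
          r.set (i + j) (r.getD (i + j) 0 + a.getD i 0 * g.getD j 0)) r)
      (List.replicate (a.length + g.length - 1) (0 : Int))).getD k 0
        = ∑ i ∈ Finset.range m, ∑ j ∈ Finset.range g.length,
            (if i + j = k then a.getD i 0 * g.getD j 0 else 0) := by
  intro m
  induction m with
  | zero =>
    intro _
    refine ⟨by simp, fun k => ?_⟩
    simp only [List.range_zero, List.foldl_nil, Finset.sum_range_zero]
    rw [List.getD_eq_getElem?_getD, List.getElem?_replicate]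
    split <;> rfl
  | succ m ih =>
    intro hm
    obtain ⟨hlen, hval⟩ := ih (by omega)
    rw [List.range_succ, List.foldl_append]
    simp only [List.foldl_cons, List.foldl_nil]
    obtain ⟨hlen2, hval2⟩ := innerA a g m (by omega) g.length le_rfl _ hlen
    refine ⟨hlen2, fun k => ?_⟩
    rw [hval2 k, hval k, Finset.sum_range_succ]

theorem mapA :
    ∀ (m : Nat) (r : List Int), m ≤ r.length →
    ((List.range m).foldl (fun r i => r.set i (if r.getD i 0 % 2 = 0 then 0 else 1)) r).length
      = r.length ∧
    ∀ k, ((List.range m).foldl (fun r i => r.set i (if r.getD i 0 % 2 = 0 then 0 else 1)) r).getD k 0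
      = if k < m then (if r.getD k 0 % 2 = 0 then 0 else 1) else r.getD k 0 := by
  intro m
  induction m with
  | zero => intro r _; simp
  | succ m ih =>
    intro r hm
    obtain ⟨hlen, hval⟩ := ih r (by omega)
    rw [List.range_succ, List.foldl_append]
    set R := (List.range m).foldl (fun r i => r.set i (if r.getD i 0 % 2 = 0 then 0 else 1)) r
      with hR
    have hpos : m < R.length := by rw [hlen]; omega
    have hRm : R.getD m 0 = r.getD m 0 := by rw [hval m, if_neg (by omega)]
    constructor
    · simp only [List.foldl_cons, List.foldl_nil, List.length_set]; exact hlen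
    · intro k
      simp only [List.foldl_cons, List.foldl_nil]
      rw [getD_set_lt R m k _ hpos, hRm, hval k]
      by_cases hk : k = m
      · rw [hk, if_pos rfl, if_pos (Nat.lt_succ_self m)]
      · rw [if_neg hk]
        by_cases hk2 : k < m
        · rw [if_pos hk2, if_pos (show k < m + 1 by omega)]
        · rw [if_neg hk2, if_neg (show ¬ k < m + 1 by omega)]

theorem searchA (a g : List Int) :
    (search a g).length = a.length + g.length - 1 ∧
    ∀ k, k < a.length + g.length - 1 →
      (search a g).getD k 0 = (if convC a g k % 2 = 0 then 0 else 1) := by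
  unfold search
  obtain ⟨hlen, hval⟩ := outerA a g a.length le_rfl
  set R := (List.range a.length).foldl (fun r i =>
      (List.range g.length).foldl (fun r j =>
        r.set (i + j) (r.getD (i + j) 0 + a.getD i 0 * g.getD j 0)) r)
    (List.replicate (a.length + g.length - 1) (0 : Int)) with hR
  obtain ⟨hlen2, hval2⟩ := mapA R.length R le_rfl
  constructor
  · rw [hlen2, hlen]
  · intro k hk
    rw [hval2 k, if_pos (by omega), hval k]
    rfl

-- ===== B-side characterisation =====

def bitsOf (a : List Int) : Nat :=
  (List.range a.length).foldl (fun acc i => acc ||| ((a.getD i 0 % 2).toNat <<< i)) 0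

def prodOf (a g : List Int) : Nat :=
  (List.range g.length).foldl (fun acc j =>
    if g.getD j 0 % 2 = 1 then acc ^^^ (bitsOf a <<< j) else acc) 0

theorem testBit_one' (j : Nat) : Nat.testBit 1 j = decide (j = 0) := by
  cases j with
  | zero => rfl
  | succ j =>
    rw [Nat.testBit_eq_decide_div_mod_eq, Nat.div_eq_of_lt (by
      calc (1:Nat) < 2 ^ 1 := by norm_num
        _ ≤ 2 ^ (j+1) := Nat.pow_le_pow_right (by norm_num) (by omega))]
    simp

theorem testBit_bits_aux (a : List Int) :
    ∀ (m : Nat) (acc k : Nat),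
    Nat.testBit ((List.range m).foldl (fun acc i => acc ||| ((a.getD i 0 % 2).toNat <<< i)) acc) k
      = (acc.testBit k || (decide (k < m) && decide (a.getD k 0 % 2 = 1))) := by
  intro m
  induction m with
  | zero => intro acc k; simp
  | succ m ih =>
    intro acc k
    rw [List.range_succ, List.foldl_append]
    simp only [List.foldl_cons, List.foldl_nil]
    rw [Nat.testBit_or, ih, Nat.testBit_shiftLeft]
    by_cases ho : a.getD m 0 % 2 = 1
    · have ho' : a[m]?.getD 0 % 2 = 1 := by
        rw [← List.getD_eq_getElem?_getD]; exact ho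
      have h1 : (a.getD m 0 % 2).toNat = 1 := by rw [ho]; rfl
      rw [h1, testBit_one']
      by_cases hk : k = m
      · rw [hk]; simp [ho']
      · by_cases hk2 : k < m
        · simp [hk2, (show k ≤ m by omega), (show ¬ m ≤ k by omega)]
        · simp [hk2, (show ¬ k ≤ m by omega), (show m ≤ k by omega),
            (show ¬ (k - m = 0) by omega)]
    · have h0 : a.getD m 0 % 2 = 0 := by
        rcases Int.emod_two_eq (a.getD m 0) with h | h
        · exact h
        · exact absurd h ho
      have h0' : a[m]?.getD 0 % 2 = 0 := by
        rw [← List.getD_eq_getElem?_getD]; exact h0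
      have h1 : (a.getD m 0 % 2).toNat = 0 := by rw [h0]; rfl
      rw [h1]
      simp only [Nat.zero_testBit, Bool.and_false, Bool.or_false]
      by_cases hk : k = m
      · rw [hk]; simp [h0']
      · have hiff : k < m ↔ k < m + 1 := by omega
        simp [hiff]

theorem testBit_bitsOf (a : List Int) (k : Nat) :
    (bitsOf a).testBit k = (decide (k < a.length) && decide (a.getD k 0 % 2 = 1)) := by
  unfold bitsOf
  rw [testBit_bits_aux a a.length 0 k, Nat.zero_testBit, Bool.false_or]

def zb (b : Bool) : ZMod 2 := if b then 1 else 0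

theorem zb_xor (x y : Bool) : zb (x ^^ y) = zb x + zb y := by
  cases x <;> cases y <;> decide

theorem prod_aux (a g : List Int) :
    ∀ (m : Nat) (acc k : Nat),
    zb (Nat.testBit ((List.range m).foldl (fun acc j =>
        if g.getD j 0 % 2 = 1 then acc ^^^ (bitsOf a <<< j) else acc) acc) k)
      = zb (acc.testBit k)
        + ∑ j ∈ Finset.range m,
            (if g.getD j 0 % 2 = 1
              then zb (decide (j ≤ k) && (bitsOf a).testBit (k - j)) else 0) := by
  intro m
  induction m with
  | zero => intro acc k; simp
  | succ m ih =>
    intro acc k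
    rw [List.range_succ, List.foldl_append]
    simp only [List.foldl_cons, List.foldl_nil]
    rw [Finset.sum_range_succ, ← add_assoc, ← ih acc k]
    by_cases ho : g.getD m 0 % 2 = 1
    · rw [if_pos ho, if_pos ho, Nat.testBit_xor, zb_xor, Nat.testBit_shiftLeft]
    · rw [if_neg ho, if_neg ho, add_zero]

theorem zb_prodOf (a g : List Int) (k : Nat) :
    zb ((prodOf a g).testBit k)
      = ∑ j ∈ Finset.range g.length,
          (if g.getD j 0 % 2 = 1
            then zb (decide (j ≤ k) && (decide (k - j < a.length)
                      && decide (a.getD (k - j) 0 % 2 = 1))) else 0) := by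
  unfold prodOf
  rw [prod_aux a g g.length 0 k, Nat.zero_testBit]
  simp only [zb, if_neg Bool.false_ne_true, zero_add]
  refine Finset.sum_congr rfl fun j _ => ?_
  rw [testBit_bitsOf]

-- ===== the GF(2) bridge =====

theorem zcast_int (x : Int) : ((x : ZMod 2)) = if x % 2 = 1 then 1 else 0 := by
  rcases Int.emod_two_eq x with h | h
  · have h2 : (2:Int) ∣ x := by omega
    obtain ⟨c, rfl⟩ := h2
    rw [if_neg (by omega)]
    push_cast
    rw [(by decide : (2:ZMod 2) = 0), zero_mul]
  · have h2 : (2:Int) ∣ (x - 1) := by omega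
    obtain ⟨c, hc⟩ := h2
    have hx : x = 2 * c + 1 := by omega
    subst hx
    rw [if_pos (by omega)]
    push_cast
    rw [(by decide : (2:ZMod 2) = 0), zero_mul, zero_add]

theorem conv_zmod (a g : List Int) (k : Nat) :
    ((convC a g k : ZMod 2))
      = ∑ i ∈ Finset.range a.length, ∑ j ∈ Finset.range g.length,
          (if i + j = k
            then (if a.getD i 0 % 2 = 1 ∧ g.getD j 0 % 2 = 1 then (1 : ZMod 2) else 0)
            else 0) := by
  unfold convC
  push_cast
  refine Finset.sum_congr rfl fun i _ => Finset.sum_congr rfl fun j _ => ?_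
  split
  · rw [zcast_int, zcast_int]
    split_ifs <;> simp_all <;> omega
  · rfl

theorem main_k (a g : List Int) (k : Nat) :
    zb ((prodOf a g).testBit k) = ((convC a g k : ZMod 2)) := by
  rw [zb_prodOf, conv_zmod, Finset.sum_comm]
  refine Finset.sum_congr rfl fun j hj => Eq.symm ?_
  by_cases hjk : j ≤ k
  · have hcond : ∀ i : Nat, (i + j = k) ↔ (i = k - j) := fun i => by omega
    calc ∑ i ∈ Finset.range a.length,
          (if i + j = k
            then (if a.getD i 0 % 2 = 1 ∧ g.getD j 0 % 2 = 1 then (1 : ZMod 2) else 0)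
            else 0)
        = ∑ i ∈ Finset.range a.length,
          (if i = k - j
            then (if a.getD i 0 % 2 = 1 ∧ g.getD j 0 % 2 = 1 then (1 : ZMod 2) else 0)
            else 0) := by
          refine Finset.sum_congr rfl fun i _ => ?_
          rw [if_congr (hcond i) rfl rfl]
      _ = if k - j ∈ Finset.range a.length
            then (if a.getD (k - j) 0 % 2 = 1 ∧ g.getD j 0 % 2 = 1 then (1 : ZMod 2) else 0)
            else 0 := Finset.sum_ite_eq' _ _ _
      _ = if g.getD j 0 % 2 = 1
            then zb (decide (j ≤ k) && (decide (k - j < a.length)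
                      && decide (a.getD (k - j) 0 % 2 = 1))) else 0 := by
          simp only [Finset.mem_range]
          by_cases hg : g.getD j 0 % 2 = 1
          · by_cases ha : k - j < a.length
            · by_cases hpa : a.getD (k - j) 0 % 2 = 1
              · rw [if_pos ha, if_pos ⟨hpa, hg⟩, if_pos hg, decide_eq_true hjk,
                    decide_eq_true ha, decide_eq_true hpa]
                rfl
              · rw [if_pos ha, if_neg (fun h => hpa h.1), if_pos hg,
                    decide_eq_false hpa]
                simp [zb]
            · rw [if_neg ha, if_pos hg, decide_eq_false ha]
              simp [zb]
          · rw [if_neg hg]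
            by_cases ha : k - j < a.length
            · rw [if_pos ha, if_neg (fun h => hg h.2)]
            · rw [if_neg ha]
  · have h0 : ∀ i ∈ Finset.range a.length,
        (if i + j = k
          then (if a.getD i 0 % 2 = 1 ∧ g.getD j 0 % 2 = 1 then (1 : ZMod 2) else 0)
          else 0) = 0 := fun i _ => if_neg (by omega)
    rw [Finset.sum_eq_zero h0]
    have : (decide (j ≤ k)) = false := by simp [hjk]
    simp [this, zb]

-- extract the 0/1 value of a bit of prodOf
theorem bit_val (p k : Nat) :
    ((p >>> k) &&& 1 : Nat) = if p.testBit k then 1 else 0 := by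
  rw [Nat.and_one_is_mod, Nat.shiftRight_eq_div_pow, Nat.testBit_eq_decide_div_mod_eq]
  have := Nat.mod_two_eq_zero_or_one (p / 2 ^ k)
  split <;> simp_all

-- ===== VERDICT (by name: the statement is the Claim_ definition above) =====
theorem search_spec : Claim_equal_search := by
  intro a g _
  unfold Spec_search
  have hB : search_alt a g
      = (List.range (a.length + g.length - 1)).map
          (fun k => (((prodOf a g >>> k) &&& 1 : Nat) : Int)) := rfl
  obtain ⟨hlen, hval⟩ := searchA a g
  rw [hB]
  refine List.ext_getElem (by simp [hlen]) fun i h1 h2 => ?_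
  have hi : i < a.length + g.length - 1 := by simpa [hlen] using h1
  rw [List.getElem_map, List.getElem_range]
  rw [← List.getD_eq_getElem (search a g) 0 h1, hval i hi, bit_val]
  have hmain := main_k a g i
  rw [zcast_int] at hmain
  rcases Int.emod_two_eq (convC a g i) with h | h
  · rw [if_pos h]
    rw [h] at hmain
    have : zb ((prodOf a g).testBit i) = 0 := by
      rw [hmain]; rw [if_neg (by omega)]
    have hb : (prodOf a g).testBit i = false := by
      cases hbb : (prodOf a g).testBit i with
      | false => rfl
      | true => rw [hbb] at this; exact absurd this (by decide)
    rw [hb]; simp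
  · rw [if_neg (by omega)]
    rw [h] at hmain
    have : zb ((prodOf a g).testBit i) = 1 := by rw [hmain, if_pos rfl]
    have hb : (prodOf a g).testBit i = true := by
      cases hbb : (prodOf a g).testBit i with
      | true => rfl
      | false => rw [hbb] at this; exact absurd this (by decide)
    rw [hb]; simp
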